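-- pv_equiv track=rewrite | github.com/MangeshM07/GFG_Python | Lists/Programs/immediate_smaller.py | immediateSmaller
-- ===== SOURCE A (Python) =====
-- def immediateSmaller(arr, n, x):
--     # return required ans
--
--     # code here
--     arr1 = sorted(arr)
--
--     for i in range(len(arr1)):
--         if arr1[i] >= x and i == 0:
--             return -1
--         elif arr1[i] > x:
--             return arr1[i - 1]
--         i += 1
--
--     if arr1[i] < x:
--         return arr1[i]
-- ===== SOURCE B (Python) =====
-- def immediateSmaller(arr, n, x):
--     best = None
--     for a in arr:
--         if a < x:
--             if best is None or best < a:
--                 best = a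
--     return best if best is not None else -1
-- ===== Notes on version B (the rewrite author's own statement) =====
-- stated objective: simpler
-- what changed: B replaces A's sort-then-scan-for-the-first-larger-element with a single linear pass keeping the running maximum of elements strictly below x.
-- intended difference: When x itself occurs in arr together with elements on both sides of it, A returns x (the predecessor of the first element > x in sorted order), while B returns the largest element strictly smaller than x, which is what 'immediate smaller element than x' asks for. — e.g. on immediateSmaller([1, 5, 7], 3, 5): A returns 5, B returns 1
-- crash fix: A raises UnboundLocalError on the empty list and IndexError (arr1[len(arr1)]: after the for loop the body's 'i += 1' has left i == len(arr1)) whenever some element is below x but none is above it; B returns -1 on the empty list and the largest element below x otherwise. — e.g. on immediateSmaller([1, 2], 2, 5): A raises IndexError, B returns 2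
import Mathlib
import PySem

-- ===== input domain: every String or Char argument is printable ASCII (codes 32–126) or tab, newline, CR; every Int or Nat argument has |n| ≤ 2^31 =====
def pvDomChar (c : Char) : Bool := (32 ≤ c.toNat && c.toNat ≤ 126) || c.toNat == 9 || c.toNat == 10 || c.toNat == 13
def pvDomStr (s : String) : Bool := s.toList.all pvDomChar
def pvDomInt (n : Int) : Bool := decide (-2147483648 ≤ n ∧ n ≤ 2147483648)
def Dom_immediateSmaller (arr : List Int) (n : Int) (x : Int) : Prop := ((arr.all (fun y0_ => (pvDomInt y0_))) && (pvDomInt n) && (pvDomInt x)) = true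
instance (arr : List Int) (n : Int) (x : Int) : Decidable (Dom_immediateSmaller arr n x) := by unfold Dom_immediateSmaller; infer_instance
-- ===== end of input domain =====

-- B: one linear pass keeping the max element < x, instead of A's sort-then-scan; B fixes
-- A's value x (not a smaller element) when x ∈ arr with elements on both sides (see D_).

-- ===== PORT A =====
-- A's `for i in range(len(arr1))` loop; fuel = number of remaining iterations (totality
-- guard only, called with fuel = arr1.length); none = the loop finished without returning
def pvLoopA (arr1 : List Int) (x : Int) (i : Nat) : Nat → Option Int
  | 0 => none
  | fuel + 1 =>
    if h : i < arr1.length then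
      if arr1[i] ≥ x ∧ i = 0 then some (-1)
      else if arr1[i] > x then PySem.List.pyGet? arr1 ((i : Int) - 1)
      else pvLoopA arr1 x (i + 1) fuel
    else none

def immediateSmaller (arr : List Int) (_n : Int) (x : Int) : Int :=
  let arr1 := PySem.List.sorted arr (fun a => a) false
  match pvLoopA arr1 x 0 arr1.length with
  | some r => r
  | none =>
    -- in Python 3, after the loop the body's `i += 1` has left i == len(arr1), so on any
    -- input reaching this point `arr1[i]` raises IndexError (and the empty list raises
    -- UnboundLocalError: i is unbound); Pre_ excludes exactly these inputs
    match PySem.List.pyGet? arr1 (arr1.length : Int) with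
    | some v => if v < x then v else 0
    | none => 0

-- ===== PORT B =====
-- the body of B's single for-loop
def pvStep (x : Int) (best : Option Int) (a : Int) : Option Int :=
  if a < x then
    match best with
    | none => some a
    | some b => if b < a then some a else best
  else best

def immediateSmaller_alt (arr : List Int) (_n : Int) (x : Int) : Int :=
  match arr.foldl (pvStep x) none with
  | none => -1
  | some b => b

-- ===== PRECONDITION & SPEC =====
-- Pre_ excludes exactly the inputs on which A raises: the empty list (UnboundLocalError)
-- and lists with an element below x but none above it, where the loop falls through with
-- i == len(arr1) and arr1[i] raises IndexError.
def Pre_immediateSmaller (arr : List Int) (n : Int) (x : Int) : Prop :=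
  arr ≠ [] ∧ ((∃ a ∈ arr, a < x) → ∃ a ∈ arr, x < a)
instance (arr : List Int) (n : Int) (x : Int) : Decidable (Pre_immediateSmaller arr n x) := by
  unfold Pre_immediateSmaller; infer_instance

def pvWitness_immediateSmaller : List Int × Int × Int := ([1, 8], 2, 5)

-- A raises UnboundLocalError on the empty list and IndexError (arr1[len(arr1)] after the
-- loop) whenever some element is below x but none is above it; B returns -1 on the empty
-- list and the largest element below x otherwise.
def Raises_immediateSmaller (arr : List Int) (n : Int) (x : Int) : Prop :=
  arr = [] ∨ ((∃ a ∈ arr, a < x) ∧ ¬ ∃ a ∈ arr, x < a)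
instance (arr : List Int) (n : Int) (x : Int) : Decidable (Raises_immediateSmaller arr n x) := by
  unfold Raises_immediateSmaller; infer_instance

def pvRaiseWitness_immediateSmaller : List Int × Int × Int := ([1, 2], 2, 5)
def pvRaiseWitnessOut_immediateSmaller : Int := 2

-- When x occurs in arr together with elements on both sides of it, A returns x itself
-- (not a smaller element) while B returns the largest element strictly below x, the
-- intended 'immediate smaller element than x'.
def D_immediateSmaller (arr : List Int) (n : Int) (x : Int) : Prop :=
  x ∈ arr ∧ (∃ a ∈ arr, a < x) ∧ (∃ a ∈ arr, x < a)
instance (arr : List Int) (n : Int) (x : Int) : Decidable (D_immediateSmaller arr n x) := by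
  unfold D_immediateSmaller; infer_instance

def Spec_immediateSmaller (arr : List Int) (n : Int) (x : Int) (out : Int) : Prop :=
  ¬ D_immediateSmaller arr n x → out = immediateSmaller_alt arr n x
instance (arr : List Int) (n : Int) (x : Int) (out : Int) : Decidable (Spec_immediateSmaller arr n x out) := by
  unfold Spec_immediateSmaller; infer_instance

def pvDiffWitness_immediateSmaller : List Int × Int × Int := ([1, 5, 7], 3, 5)
def pvDiffWitnessOut_immediateSmaller : Int × Int := (5, 1)

-- ===== CLAIM (what is proved, stated in full; the proofs are below) =====
def Claim_unchanged_immediateSmaller : Prop := ∀ (arr : List Int) (n : Int) (x : Int), Dom_immediateSmaller arr n x → Pre_immediateSmaller arr n x → Spec_immediateSmaller arr n x (immediateSmaller arr n x)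
def Claim_changed_immediateSmaller : Prop := Dom_immediateSmaller (pvDiffWitness_immediateSmaller.1) (pvDiffWitness_immediateSmaller.2.1) (pvDiffWitness_immediateSmaller.2.2) ∧ Pre_immediateSmaller (pvDiffWitness_immediateSmaller.1) (pvDiffWitness_immediateSmaller.2.1) (pvDiffWitness_immediateSmaller.2.2) ∧ D_immediateSmaller (pvDiffWitness_immediateSmaller.1) (pvDiffWitness_immediateSmaller.2.1) (pvDiffWitness_immediateSmaller.2.2) ∧ immediateSmaller (pvDiffWitness_immediateSmaller.1) (pvDiffWitness_immediateSmaller.2.1) (pvDiffWitness_immediateSmaller.2.2) = pvDiffWitnessOut_immediateSmaller.1 ∧ immediateSmaller_alt (pvDiffWitness_immediateSmaller.1) (pvDiffWitness_immediateSmaller.2.1) (pvDiffWitness_immediateSmaller.2.2) = pvDiffWitnessOut_immediateSmaller.2 ∧ pvDiffWitnessOut_immediateSmaller.1 ≠ pvDiffWitnessOut_immediateSmaller.2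
def Claim_exact_immediateSmaller : Prop := ∀ (arr : List Int) (n : Int) (x : Int), Dom_immediateSmaller arr n x → Pre_immediateSmaller arr n x → D_immediateSmaller arr n x → immediateSmaller arr n x ≠ immediateSmaller_alt arr n x
def Claim_raises_immediateSmaller : Prop := (∀ (arr : List Int) (n : Int) (x : Int), Dom_immediateSmaller arr n x → Raises_immediateSmaller arr n x → ¬ Pre_immediateSmaller arr n x) ∧ (Dom_immediateSmaller (pvRaiseWitness_immediateSmaller.1) (pvRaiseWitness_immediateSmaller.2.1) (pvRaiseWitness_immediateSmaller.2.2) ∧ Raises_immediateSmaller (pvRaiseWitness_immediateSmaller.1) (pvRaiseWitness_immediateSmaller.2.1) (pvRaiseWitness_immediateSmaller.2.2) ∧ immediateSmaller_alt (pvRaiseWitness_immediateSmaller.1) (pvRaiseWitness_immediateSmaller.2.1) (pvRaiseWitness_immediateSmaller.2.2) = pvRaiseWitnessOut_immediateSmaller)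

-- ===== LEMMAS AND PROOFS =====

-- proof-side reformulation of A's scan: walk the tail remembering the previous element
def pvH (prev x : Int) : List Int → Option Int
  | [] => none
  | a :: t => if x < a then some prev else pvH a x t

theorem pvLoopA_bridge (x : Int) : ∀ (l pre : List Int) (prev : Int) (fuel : Nat),
    l.length ≤ fuel →
    pvLoopA (pre ++ prev :: l) x (pre.length + 1) fuel = pvH prev x l := by
  intro l
  induction l with
  | nil =>
    intro pre prev fuel _
    cases fuel with
    | zero => rfl
    | succ f => simp [pvLoopA, pvH]
  | cons a t ih =>
    intro pre prev fuel hf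
    cases fuel with
    | zero => simp at hf
    | succ f =>
      have hf' : t.length ≤ f := by simp at hf; omega
      have hlen : pre.length + 1 < (pre ++ prev :: a :: t).length := by simp
      have hget : (pre ++ prev :: a :: t)[pre.length + 1]'hlen = a := by
        rw [List.getElem_append_right (by omega)]
        simp
      show (if h : pre.length + 1 < (pre ++ prev :: a :: t).length then _ else none) = _
      rw [dif_pos hlen]
      simp only [hget]
      have h1 : ¬ (a ≥ x ∧ pre.length + 1 = 0) := by omega
      rw [if_neg h1]
      by_cases hxa : x < a
      · rw [if_pos hxa]
        have hcast : ((pre.length + 1 : Nat) : Int) - 1 = ((pre.length : Nat) : Int) := by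
          push_cast; ring
        have hg : PySem.List.pyGet? (pre ++ prev :: a :: t) (((pre.length + 1 : Nat) : Int) - 1) = some prev := by
          rw [hcast, PySem.List.pyGet?_natCast]
          rw [List.getElem?_append_right (by omega)]
          simp
        rw [hg]
        simp [pvH, hxa]
      · rw [if_neg hxa]
        have hre : pre ++ prev :: a :: t = (pre ++ [prev]) ++ a :: t := by simp
        have hlen2 : pre.length + 1 + 1 = (pre ++ [prev]).length + 1 := by simp
        rw [hre, hlen2, ih (pre ++ [prev]) a f hf']
        simp [pvH, hxa]

theorem pvLoopA_start (h x : Int) (t : List Int) :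
    pvLoopA (h :: t) x 0 (h :: t).length = if x ≤ h then some (-1) else pvH h x t := by
  show (if hh : 0 < (h :: t).length then _ else none) = _
  rw [dif_pos (by simp)]
  by_cases hx : x ≤ h
  · rw [if_pos hx, if_pos (by exact ⟨hx, rfl⟩)]
  · rw [if_neg hx, if_neg (by simpa using hx), if_neg (by simpa using le_of_not_ge hx)]
    have := pvLoopA_bridge x t [] h t.length (le_refl _)
    simpa using this

-- pvH on a sorted tail returns the greatest element ≤ x, provided something exceeds x
theorem pvH_spec (x : Int) : ∀ (t : List Int) (h : Int),
    (h :: t).Pairwise (· ≤ ·) → h ≤ x → (∃ a ∈ t, x < a) →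
    ∃ m, pvH h x t = some m ∧ m ∈ h :: t ∧ m ≤ x ∧ ∀ a ∈ h :: t, a ≤ x → a ≤ m := by
  intro t
  induction t with
  | nil => intro h _ _ hw; simp at hw
  | cons a t' ih =>
    intro h hp hhx hw
    have hp' : (a :: t').Pairwise (· ≤ ·) := hp.of_cons
    by_cases hxa : x < a
    · refine ⟨h, by simp [pvH, hxa], by simp, hhx, ?_⟩
      intro b hb hbx
      rcases List.mem_cons.mp hb with rfl | hb
      · exact le_refl _
      · rcases List.mem_cons.mp hb with rfl | hb
        · omega
        · have : a ≤ b := (List.pairwise_cons.mp hp').1 b hb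
          omega
    · have hax : a ≤ x := le_of_not_gt hxa
      have hw' : ∃ b ∈ t', x < b := by
        rcases hw with ⟨b, hb, hbx⟩
        rcases List.mem_cons.mp hb with rfl | hb
        · omega
        · exact ⟨b, hb, hbx⟩
      obtain ⟨m, hm, hmem, hmx, hmax⟩ := ih a hp' hax hw'
      refine ⟨m, by simpa [pvH, hxa] using hm, by simp [List.mem_cons] at hmem ⊢; tauto, hmx, ?_⟩
      intro b hb hbx
      rcases List.mem_cons.mp hb with rfl | hb
      · have hba : b ≤ a := (List.pairwise_cons.mp hp).1 a (by simp)
        have : a ≤ m := hmax a (by simp) hax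
        omega
      · exact hmax b hb hbx

-- characterization of B's fold
theorem foldB_spec (x : Int) : ∀ (l : List Int) (b : Option Int), (∀ c, b = some c → c < x) →
    (match l.foldl (pvStep x) b with
    | none => b = none ∧ ∀ a ∈ l, x ≤ a
    | some m => m < x ∧ (m ∈ l ∨ b = some m) ∧ (∀ a ∈ l, a < x → a ≤ m) ∧ ∀ c, b = some c → c ≤ m) := by
  intro l
  induction l with
  | nil =>
    intro b hb
    cases b with
    | none => exact ⟨rfl, by simp⟩
    | some c =>
      exact ⟨hb c rfl, Or.inr rfl, by simp, fun c' hc' => by injection hc' with h; omega⟩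
  | cons a t ih =>
    intro b hb
    simp only [List.foldl_cons]
    by_cases hax : a < x
    · -- the step updates the accumulator to some of (max of a and the old best)
      have hkey : ∀ (b' : Int), pvStep x b a = some b' →
          b' < x ∧ (b' = a ∨ b = some b') ∧ (a ≤ b') ∧ ∀ c, b = some c → c ≤ b' := by
        intro b' hs
        cases b with
        | none =>
          simp [pvStep, hax] at hs
          exact ⟨hs ▸ hax, Or.inl hs.symm, hs ▸ le_refl a, fun c hc => by cases hc⟩
        | some c =>
          have hcx : c < x := hb c rfl
          by_cases hca : c < a
          · simp [pvStep, hax, hca] at hs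
            exact ⟨hs ▸ hax, Or.inl hs.symm, hs ▸ le_refl a,
              fun c' hc' => by injection hc' with h; omega⟩
          · simp [pvStep, hax, hca] at hs
            exact ⟨hs ▸ hcx, Or.inr (by rw [hs]), hs ▸ le_of_not_gt hca,
              fun c' hc' => by injection hc' with h; omega⟩
      obtain ⟨b', hs⟩ : ∃ b', pvStep x b a = some b' := by
        cases b with
        | none => exact ⟨a, by simp [pvStep, hax]⟩
        | some c =>
          by_cases hca : c < a
          · exact ⟨a, by simp [pvStep, hax, hca]⟩
          · exact ⟨c, by simp [pvStep, hax, hca]⟩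
      obtain ⟨hb'x, hb'src, hab', hacc⟩ := hkey b' hs
      rw [hs]
      have H := ih (some b') (fun c hc => by injection hc with h; omega)
      revert H
      cases htl : t.foldl (pvStep x) (some b') with
      | none => intro H; exact absurd H.1 (by simp)
      | some m =>
        intro H
        obtain ⟨hmx, hmem, hub, haccm⟩ := H
        have hb'm : b' ≤ m := haccm b' rfl
        refine ⟨hmx, ?_, ?_, ?_⟩
        · rcases hmem with hm | hm
          · exact Or.inl (List.mem_cons_of_mem _ hm)
          · injection hm with hm
            rcases hb'src with rfl | hbb
            · exact Or.inl (hm ▸ List.mem_cons_self)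
            · exact Or.inr (hm ▸ hbb)
        · intro c hc hcx
          rcases List.mem_cons.mp hc with rfl | hc
          · omega
          · exact hub c hc hcx
        · intro c hc
          have := hacc c hc; omega
    · -- a ≥ x: the accumulator is unchanged
      have hs : pvStep x b a = b := by simp [pvStep, hax]
      rw [hs]
      have H := ih b hb
      revert H
      cases htl : t.foldl (pvStep x) b with
      | none =>
        intro H
        refine ⟨H.1, ?_⟩
        intro c hc
        rcases List.mem_cons.mp hc with rfl | hc
        · omega
        · exact H.2 c hc
      | some m =>
        intro H
        obtain ⟨hmx, hmem, hub, haccm⟩ := H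
        refine ⟨hmx, ?_, ?_, haccm⟩
        · rcases hmem with hm | hm
          · exact Or.inl (List.mem_cons_of_mem _ hm)
          · exact Or.inr hm
        · intro c hc hcx
          rcases List.mem_cons.mp hc with rfl | hc
          · omega
          · exact hub c hc hcx

-- A's value under Pre_: -1 if nothing is below x, else the greatest element ≤ x
theorem immediateSmaller_char (arr : List Int) (n x : Int)
    (hne : arr ≠ []) (hgt : (∃ a ∈ arr, a < x) → ∃ a ∈ arr, x < a) :
    (¬ (∃ a ∈ arr, a < x) ∧ immediateSmaller arr n x = -1) ∨
    ∃ m, immediateSmaller arr n x = m ∧ m ∈ arr ∧ m ≤ x ∧ (∀ a ∈ arr, a ≤ x → a ≤ m) ∧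
      (∃ a ∈ arr, a < x) := by
  have hperm : (PySem.List.sorted arr (fun a => a) false).Perm arr := PySem.List.sorted_perm arr _ _
  have hpw : (PySem.List.sorted arr (fun a => a) false).Pairwise (fun a b => (fun a => a) a ≤ (fun a => a) b) :=
    PySem.List.sorted_pairwise arr _
  cases hs : PySem.List.sorted arr (fun a => a) false with
  | nil =>
    exfalso; apply hne
    rw [hs] at hperm
    exact hperm.symm.eq_nil
  | cons h t =>
    rw [hs] at hperm hpw
    by_cases hxh : x ≤ h
    · left
      constructor
      · rintro ⟨a, ha, hax⟩
        have ha' : a ∈ h :: t := hperm.mem_iff.mpr ha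
        rcases List.mem_cons.mp ha' with rfl | ha'
        · omega
        · have : h ≤ a := (List.pairwise_cons.mp hpw).1 a ha'
          omega
      · unfold immediateSmaller
        simp only [hs, pvLoopA_start, if_pos hxh]
    · right
      have hhx : h < x := lt_of_not_ge hxh
      have hhmem : h ∈ arr := hperm.mem_iff.mp (by simp)
      have hsome : ∃ a ∈ t, x < a := by
        obtain ⟨a, ha, hax⟩ := hgt ⟨h, hhmem, hhx⟩
        have ha' : a ∈ h :: t := hperm.mem_iff.mpr ha
        rcases List.mem_cons.mp ha' with rfl | ha'
        · omega
        · exact ⟨a, ha', hax⟩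
      obtain ⟨m, hm, hmem, hmx, hmax⟩ := pvH_spec x t h hpw (le_of_lt hhx) hsome
      refine ⟨m, ?_, hperm.mem_iff.mp hmem, hmx, ?_, ⟨h, hhmem, hhx⟩⟩
      · unfold immediateSmaller
        simp only [hs, pvLoopA_start, if_neg hxh, hm]
      · intro a ha hax
        exact hmax a (hperm.mem_iff.mpr ha) hax

-- B's value: -1 if nothing is below x, else the greatest element < x
theorem immediateSmaller_alt_char (arr : List Int) (n x : Int) :
    (¬ (∃ a ∈ arr, a < x) ∧ immediateSmaller_alt arr n x = -1) ∨
    ∃ m, immediateSmaller_alt arr n x = m ∧ m ∈ arr ∧ m < x ∧ ∀ a ∈ arr, a < x → a ≤ m := by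
  have H := foldB_spec x arr none (by intro c hc; cases hc)
  revert H
  unfold immediateSmaller_alt
  cases htl : arr.foldl (pvStep x) none with
  | none =>
    intro H
    left
    refine ⟨?_, rfl⟩
    rintro ⟨a, ha, hax⟩
    have := H.2 a ha; omega
  | some m =>
    intro H
    obtain ⟨hmx, hmem, hub, _⟩ := H
    right
    refine ⟨m, rfl, ?_, hmx, hub⟩
    rcases hmem with hm | hm
    · exact hm
    · cases hm

-- ===== VERDICT (by name: the statement is the Claim_ definition above) =====
theorem immediateSmaller_spec : Claim_unchanged_immediateSmaller := by
  intro arr n x _hdom hpre hnd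
  obtain ⟨hne, hgt⟩ := hpre
  rcases immediateSmaller_char arr n x hne hgt with ⟨hno, hA⟩ | ⟨m, hA, hmem, hmx, hmax, hbelow⟩
  · rcases immediateSmaller_alt_char arr n x with ⟨_, hB⟩ | ⟨m', _, hmem', hmx', _⟩
    · rw [hA, hB]
    · exact absurd ⟨m', hmem', hmx'⟩ hno
  · have hxnot : x ∉ arr := fun hx => hnd ⟨hx, hbelow, hgt hbelow⟩
    have hmlt : m < x := lt_of_le_of_ne hmx (by rintro rfl; exact hxnot hmem)
    rcases immediateSmaller_alt_char arr n x with ⟨hno', _⟩ | ⟨m', hB, hmem', hmx', hub'⟩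
    · exact absurd hbelow hno'
    · have h1 : m ≤ m' := hub' m hmem hmlt
      have h2 : m' ≤ m := hmax m' hmem' (le_of_lt hmx')
      rw [hA, hB]; omega

theorem immediateSmaller_changed : Claim_changed_immediateSmaller := by
  unfold Claim_changed_immediateSmaller; decide

theorem immediateSmaller_tight : Claim_exact_immediateSmaller := by
  intro arr n x _hdom hpre hd
  obtain ⟨hne, hgt⟩ := hpre
  obtain ⟨hxin, hbelow, _⟩ := hd
  rcases immediateSmaller_char arr n x hne hgt with ⟨hno, _⟩ | ⟨m, hA, _, hmx, hmax, _⟩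
  · exact absurd hbelow hno
  · have hxm : x ≤ m := hmax x hxin (le_refl x)
    rcases immediateSmaller_alt_char arr n x with ⟨hno', _⟩ | ⟨m', hB, _, hmx', _⟩
    · exact absurd hbelow hno'
    · rw [hA, hB]; omega

theorem immediateSmaller_raises : Claim_raises_immediateSmaller := by
  unfold Claim_raises_immediateSmaller
  refine ⟨?_, by decide⟩
  intro arr n x _ hr hp
  rcases hr with h | ⟨hb, hn⟩
  · exact hp.1 h
  · exact hn (hp.2 hb)

-- self-check: the raise-witness value asserted in Claim_raises_ is B's value there
theorem pvRaiseWitness_ok :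
    immediateSmaller_alt pvRaiseWitness_immediateSmaller.1 pvRaiseWitness_immediateSmaller.2.1
      pvRaiseWitness_immediateSmaller.2.2 = pvRaiseWitnessOut_immediateSmaller :=
  immediateSmaller_raises.2.2.2
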